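-- pv_equiv track=rewrite | github.com/MolarVerse/PQAnalysis | PQAnalysis/io/inputFileReader/PIMD_QMCF/PIMD_QMCF_inputFileReader.py | _increase_digit_string
-- ===== SOURCE A (Python) =====
-- def _increase_digit_string(digit_string: str) -> str:
--     """
--     increases a string containing only digits by one
--
--     If the string contains leading zeros, they are preserved.
--     The total length of the string is preserved, if there are leading zeros.
--
--     For example:
--     "0001" -> "0002"
--     "001" -> "002"
--     "099" -> "100"
--     "999" -> "1000"
--
--     Parameters
--     ----------
--     digit_string : str
--         string containing only digits to be increased
--
--     Returns
--     -------
--     str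
--         increased string by one
--
--     Raises
--     ------
--     ValueError
--         if digit_string contains non-digit characters
--     """
--
--     if not all([char.isdigit() for char in digit_string]):
--         raise ValueError(
--             f"digit_string {digit_string} contains non-digit characters.")
--
--     string_without_leading_zeros = digit_string.lstrip("0")
--
--     if string_without_leading_zeros == "":
--         string_without_leading_zeros = "0"
--
--     string_without_leading_zeros = str(int(string_without_leading_zeros) + 1)
--
--     return "0" * (len(digit_string) - len(string_without_leading_zeros)) + string_without_leading_zeros
-- ===== SOURCE B (Python) =====
-- def _increase_digit_string(digit_string: str) -> str:
--     """Increment a digit string by one, preserving leading zeros, by a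
--     right-to-left carry walk over the characters (no whole-string int()/str())."""
--     if not all([char.isdigit() for char in digit_string]):
--         raise ValueError(
--             f"digit_string {digit_string} contains non-digit characters.")
--
--     out = ""
--     carry = 1
--     for char in reversed(digit_string):
--         total = int(char) + carry
--         out = chr(48 + total % 10) + out
--         carry = total // 10
--     if carry:
--         out = "1" + out
--     return out
-- ===== Notes on version B (the rewrite author's own statement) =====
-- stated objective: alternative
-- what changed: B replaces A's lstrip-zeros + whole-string int()/str() round-trip by a single right-to-left per-digit walk with a carry, growing the string by one leading digit only on overflow, so leading zeros are preserved position-by-position and no big integer is ever built.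
import Mathlib
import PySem

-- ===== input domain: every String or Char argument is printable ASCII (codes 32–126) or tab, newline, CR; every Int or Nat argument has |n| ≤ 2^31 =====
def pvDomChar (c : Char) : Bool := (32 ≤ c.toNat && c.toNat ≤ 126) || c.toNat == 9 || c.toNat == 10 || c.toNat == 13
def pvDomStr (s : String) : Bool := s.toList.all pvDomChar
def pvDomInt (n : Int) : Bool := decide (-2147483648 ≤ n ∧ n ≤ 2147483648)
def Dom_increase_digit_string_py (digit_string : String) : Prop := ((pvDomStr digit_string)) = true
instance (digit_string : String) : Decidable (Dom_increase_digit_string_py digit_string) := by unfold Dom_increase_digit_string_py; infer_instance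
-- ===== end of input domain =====

-- B replaces the lstrip + int()/str() round-trip by a right-to-left per-digit carry walk
-- (objective: alternative — structurally different, not measured faster).

-- ===== PORT A =====
def increase_digit_string_py (digit_string : String) : String :=
  let cs := digit_string.toList
  if !(cs.all PySem.Chars.isdigit) then ""   -- raise ValueError (excluded by Pre_)
  else
    let s1 := cs.dropWhile (fun c => c == '0')   -- digit_string.lstrip("0"): LEFT-only strip of '0's (exact; PySem owns only the two-sided stripChars)
    let s2 := if s1 = [] then ['0'] else s1
    -- int(s2) + 1: s2 is here a nonempty all-digit list, on which int() is exactly this base-10 accumulator fold (hand port, exact on such inputs)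
    let v : Int := s2.foldl (fun a c => 10 * a + ((c.toNat : Int) - 48)) 0
    let s3 := (PySem.Int.toStr (v + 1)).toList   -- str(int(s2) + 1)
    -- "0" * (len(digit_string) - len(s3)) + s3 ; Nat subtraction matches Python's "" on a negative count
    String.ofList (List.replicate (cs.length - s3.length) '0' ++ s3)

-- ===== PORT B =====
def increase_digit_string_py_alt (digit_string : String) : String :=
  let cs := digit_string.toList
  if !(cs.all PySem.Chars.isdigit) then ""   -- raise ValueError (excluded by Pre_)
  else
    -- for char in reversed(digit_string): total = int(char) + carry; out = chr(48 + total % 10) + out; carry = total // 10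
    -- (int(char) on a single digit char is exactly char.toNat - 48)
    let st := cs.reverse.foldl
      (fun (st : List Char × Int) c =>
        let total : Int := ((c.toNat : Int) - 48) + st.2
        (Char.ofNat (48 + (PySem.Int.mod total 10).toNat) :: st.1, PySem.Int.floordiv total 10))
      ([], 1)
    String.ofList (if st.2 ≠ 0 then '1' :: st.1 else st.1)

-- ===== PRECONDITION & SPEC =====
-- Pre_ excludes exactly the inputs where A raises: any non-digit character (ValueError), and the
-- all-digit inputs that hit CPython's 4300-digit integer-string conversion limit (ValueError in
-- int() when the zero-stripped part exceeds 4300 digits, or in str() when it is exactly 4300 nines).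
def Pre_increase_digit_string_py (digit_string : String) : Prop :=
  digit_string.toList.all PySem.Chars.isdigit = true ∧
  (digit_string.toList.dropWhile (fun c => c == '0')).length ≤ 4300 ∧
  digit_string.toList.dropWhile (fun c => c == '0') ≠ List.replicate 4300 '9'
instance (digit_string : String) : Decidable (Pre_increase_digit_string_py digit_string) := by
  unfold Pre_increase_digit_string_py; infer_instance
def pvWitness_increase_digit_string_py : String := "099"

def Spec_increase_digit_string_py (digit_string : String) (out : String) : Prop :=
  out = increase_digit_string_py_alt digit_string
instance (digit_string : String) (out : String) : Decidable (Spec_increase_digit_string_py digit_string out) := by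
  unfold Spec_increase_digit_string_py; infer_instance

-- ===== CLAIM (what is proved, stated in full; the proofs are below) =====
def Claim_equal_increase_digit_string_py : Prop := ∀ (digit_string : String), Dom_increase_digit_string_py digit_string → Pre_increase_digit_string_py digit_string → Spec_increase_digit_string_py digit_string (increase_digit_string_py digit_string)

-- ===== LEMMAS AND PROOFS =====

-- value of a digit list, as A's int() fold computes it over Nat
def pvVal (ds : List Char) : Nat := ds.foldl (fun a c => 10 * a + (c.toNat - 48)) 0

theorem pv_digit_bounds {c : Char} (h : PySem.Chars.isdigit c = true) :
    48 ≤ c.toNat ∧ c.toNat ≤ 57 := by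
  simp [PySem.Chars.isdigit, Char.le_def, UInt32.le_iff_toNat_le] at h
  exact h

theorem pv_val_aux (ds : List Char) : ∀ a : Nat,
    ds.foldl (fun a c => 10 * a + (c.toNat - 48)) a = a * 10 ^ ds.length + pvVal ds := by
  induction ds with
  | nil => intro a; simp [pvVal]
  | cons c t ih =>
    intro a
    simp only [List.foldl_cons, List.length_cons, pvVal]
    rw [ih, ih (10 * 0 + (c.toNat - 48))]
    ring

theorem pv_val_cons (c : Char) (t : List Char) :
    pvVal (c :: t) = (c.toNat - 48) * 10 ^ t.length + pvVal t := by
  simp only [pvVal, List.foldl_cons]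
  rw [pv_val_aux]
  simp [pvVal]

theorem pv_val_lt {ds : List Char} (h : ds.all PySem.Chars.isdigit = true) :
    pvVal ds < 10 ^ ds.length := by
  induction ds with
  | nil => simp [pvVal]
  | cons c t ih =>
    simp only [List.all_cons, Bool.and_eq_true] at h
    have hd := pv_digit_bounds h.1
    have ht := ih h.2
    rw [pv_val_cons]
    simp only [List.length_cons, pow_succ]
    have h9 : (c.toNat - 48) * 10 ^ t.length ≤ 9 * 10 ^ t.length :=
      Nat.mul_le_mul_right _ (by omega)
    omega

theorem pv_val_drop (ds : List Char) :
    pvVal (ds.dropWhile (fun c => c == '0')) = pvVal ds := by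
  induction ds with
  | nil => rfl
  | cons c t ih =>
    by_cases hc : c = '0'
    · subst hc
      rw [List.dropWhile_cons_of_pos (by decide)]
      rw [ih]
      simp [pvVal]
    · rw [List.dropWhile_cons_of_neg (by simpa using hc)]

theorem pv_intfold {ds : List Char} (h : ds.all PySem.Chars.isdigit = true) : ∀ a : Nat,
    ds.foldl (fun a c => 10 * a + ((c.toNat : Int) - 48)) (a : Int)
      = ((ds.foldl (fun a c => 10 * a + (c.toNat - 48)) a : Nat) : Int) := by
  induction ds with
  | nil => intro a; rfl
  | cons c t ih =>
    simp only [List.all_cons, Bool.and_eq_true] at h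
    intro a
    have hd := pv_digit_bounds h.1
    simp only [List.foldl_cons]
    have : (10 : Int) * (a : Int) + ((c.toNat : Int) - 48) = ((10 * a + (c.toNat - 48) : Nat) : Int) := by
      omega
    rw [this, ih h.2]

-- the k low decimal digits of m, most significant first; pvCanonPos: the plain decimal digits
def pvCanon : Nat → Nat → List Char
  | 0, _ => []
  | k + 1, m => Nat.digitChar (m / 10 ^ k % 10) :: pvCanon k (m % 10 ^ k)

def pvCanonPos (n : Nat) : List Char :=
  if n < 10 then [Nat.digitChar n]
  else pvCanonPos (n / 10) ++ [Nat.digitChar (n % 10)]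
  decreasing_by exact Nat.div_lt_self (by omega) (by omega)

theorem pv_core_step (f n : Nat) (acc : List Char) :
    Nat.toDigitsCore 10 (f + 1) n acc =
      if n / 10 = 0 then Nat.digitChar (n % 10) :: acc
      else Nat.toDigitsCore 10 f (n / 10) (Nat.digitChar (n % 10) :: acc) := rfl

theorem pv_core (f : Nat) : ∀ n acc, n < f → Nat.toDigitsCore 10 f n acc = pvCanonPos n ++ acc := by
  induction f with
  | zero => intro n acc h; omega
  | succ f ih =>
    intro n acc h
    rw [pv_core_step]
    by_cases h10 : n < 10
    · have : n / 10 = 0 := Nat.div_eq_of_lt h10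
      rw [if_pos this, pvCanonPos, if_pos h10, Nat.mod_eq_of_lt h10]
      simp
    · have hne : ¬ n / 10 = 0 := by omega
      rw [if_neg hne, ih (n / 10) _ (by omega)]
      conv_rhs => rw [pvCanonPos]
      rw [if_neg h10]
      simp

theorem pv_canon_step (k : Nat) : ∀ m, pvCanon (k + 1) m = pvCanon k (m / 10) ++ [Nat.digitChar (m % 10)] := by
  induction k with
  | zero => intro m; simp [pvCanon]
  | succ k ih =>
    intro m
    have e1 : m / 10 ^ (k + 1) = m / 10 / 10 ^ k := by
      rw [Nat.div_div_eq_div_mul, pow_succ, mul_comm (10 ^ k) 10, mul_comm 10 (10 ^ k)]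
    have e2 : m % 10 ^ (k + 1) % 10 = m % 10 := by
      exact Nat.mod_mod_of_dvd m (dvd_pow_self 10 (Nat.succ_ne_zero k))
    have e3 : m % 10 ^ (k + 1) / 10 = m / 10 % 10 ^ k := by
      rw [pow_succ, mul_comm]
      exact Nat.mod_mul_right_div_self m 10 (10 ^ k)
    calc pvCanon (k + 2) m
        = Nat.digitChar (m / 10 ^ (k + 1) % 10) :: pvCanon (k + 1) (m % 10 ^ (k + 1)) := rfl
      _ = Nat.digitChar (m / 10 ^ (k + 1) % 10) ::
            (pvCanon k (m % 10 ^ (k + 1) / 10) ++ [Nat.digitChar (m % 10 ^ (k + 1) % 10)]) := by rw [ih]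
      _ = pvCanon (k + 1) (m / 10) ++ [Nat.digitChar (m % 10)] := by
            rw [e1, e2, e3]; rfl

theorem pv_canonPos_eq (k : Nat) : ∀ m, 10 ^ k ≤ m → m < 10 ^ (k + 1) → pvCanonPos m = pvCanon (k + 1) m := by
  induction k with
  | zero =>
    intro m h1 h2
    norm_num at h1 h2
    rw [pvCanonPos, if_pos h2]
    simp [pvCanon, Nat.mod_eq_of_lt h2]
  | succ k ih =>
    intro m h1 h2
    have h10 : ¬ m < 10 := by
      have : (10:Nat) ≤ 10 ^ (k + 1) := by
        calc (10:Nat) = 10 ^ 1 := (pow_one 10).symm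
        _ ≤ 10 ^ (k+1) := Nat.pow_le_pow_right (by omega) (by omega)
      omega
    rw [pvCanonPos, if_neg h10]
    have hd1 : 10 ^ k ≤ m / 10 := by
      rw [Nat.le_div_iff_mul_le (by omega)]
      calc 10 ^ k * 10 = 10 ^ (k + 1) := (pow_succ 10 k).symm
        _ ≤ m := h1
    have hd2 : m / 10 < 10 ^ (k + 1) := by
      rw [Nat.div_lt_iff_lt_mul (by omega)]
      calc m < 10 ^ (k + 2) := h2
        _ = 10 ^ (k + 1) * 10 := pow_succ 10 (k + 1)
    rw [ih (m / 10) hd1 hd2, ← pv_canon_step]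

theorem pv_canon_pad (i : Nat) : ∀ j m, m < 10 ^ j →
    pvCanon (j + i) m = List.replicate i '0' ++ pvCanon j m := by
  induction i with
  | zero => intro j m h; simp
  | succ i ih =>
    intro j m h
    have hlt : m < 10 ^ (j + i) :=
      lt_of_lt_of_le h (Nat.pow_le_pow_right (by omega) (by omega))
    have : j + (i + 1) = (j + i) + 1 := by omega
    rw [this]
    show Nat.digitChar (m / 10 ^ (j + i) % 10) :: pvCanon (j + i) (m % 10 ^ (j + i)) = _
    rw [Nat.div_eq_of_lt hlt, Nat.mod_eq_of_lt hlt, ih j m h]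
    rfl

theorem pv_chr_eq {d : Nat} (h : d < 10) : Char.ofNat (48 + d) = Nat.digitChar d := by
  interval_cases d <;> rfl

theorem pv_toDigits (n : Nat) : Nat.toDigits 10 n = pvCanonPos n := by
  have := pv_core (n + 1) n [] (Nat.lt_succ_self n)
  simpa [Nat.toDigits] using this

theorem pv_canon_len (k : Nat) : ∀ m, (pvCanon k m).length = k := by
  induction k with
  | zero => intro m; rfl
  | succ k ih => intro m; simp [pvCanon, ih]

theorem pv_canon_zero (k : Nat) : pvCanon k 0 = List.replicate k '0' := by
  have := pv_canon_pad k 0 0 (by norm_num)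
  simpa [pvCanon] using this

theorem pv_arith (dc nt k : Nat) (hdc : dc ≤ 9) (hnt : nt < 10 ^ k) :
    (dc * 10 ^ k + nt + 1) / 10 ^ (k + 1) = (dc + (nt + 1) / 10 ^ k) / 10 ∧
    (dc * 10 ^ k + nt + 1) % 10 ^ (k + 1) / 10 ^ k % 10 = (dc + (nt + 1) / 10 ^ k) % 10 ∧
    (dc * 10 ^ k + nt + 1) % 10 ^ (k + 1) % 10 ^ k = (nt + 1) % 10 ^ k := by
  have hP : 0 < 10 ^ k := Nat.pow_pos (by omega)
  set P := 10 ^ k with hPdef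
  have hP1 : 10 ^ (k + 1) = 10 * P := by rw [pow_succ]; ring
  set ca := (nt + 1) / P with hcadef
  set r := (nt + 1) % P with hrdef
  have hr : r < P := Nat.mod_lt _ hP
  have hrep : nt + 1 = P * ca + r := (Nat.div_add_mod _ _).symm
  have hca : ca ≤ 1 := by
    have h1 : nt + 1 ≤ P := hnt
    have := Nat.div_le_div_right (c := P) h1
    rwa [Nat.div_self hP] at this
  have hm : dc * P + nt + 1 = r + P * (dc + ca) := by
    have e : P * (dc + ca) = dc * P + P * ca := by ring
    omega
  set s := dc + ca with hsdef
  have hs10 : s ≤ 10 := by omega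
  rw [hP1, hm]
  by_cases h9 : s < 10
  · have hsP : P * s ≤ P * 9 := Nat.mul_le_mul_left P (by omega)
    have hmlt : r + P * s < 10 * P := by
      have : P * 9 + P = 10 * P := by ring
      omega
    have hfst : (r + P * s) / (10 * P) = 0 := Nat.div_eq_of_lt hmlt
    have hsd : s / 10 = 0 := Nat.div_eq_of_lt h9
    refine ⟨by rw [hfst, hsd], ?_, ?_⟩
    · rw [Nat.mod_eq_of_lt hmlt, Nat.add_mul_div_left r s hP, Nat.div_eq_of_lt hr,
        Nat.zero_add, Nat.mod_eq_of_lt h9]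
    · rw [Nat.mod_eq_of_lt hmlt, Nat.add_mul_mod_self_left, Nat.mod_eq_of_lt hr, hrdef]
  · have h10 : s = 10 := by omega
    have e1 : r + P * s = r + 10 * P * 1 := by rw [h10]; ring
    rw [e1]
    have hr10 : r < 10 * P := by omega
    refine ⟨?_, ?_, ?_⟩
    · rw [Nat.add_mul_div_left r 1 (by omega), Nat.div_eq_of_lt hr10, h10]
    · rw [Nat.add_mul_mod_self_left, Nat.mod_eq_of_lt hr10, Nat.div_eq_of_lt hr, h10]
    · rw [Nat.add_mul_mod_self_left, Nat.mod_eq_of_lt hr10, Nat.mod_eq_of_lt hr, hrdef]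

theorem pv_binv (ds : List Char) (h : ds.all PySem.Chars.isdigit = true) :
    ds.reverse.foldl
      (fun (st : List Char × Int) c =>
        let total : Int := ((c.toNat : Int) - 48) + st.2
        (Char.ofNat (48 + (PySem.Int.mod total 10).toNat) :: st.1, PySem.Int.floordiv total 10))
      ([], 1)
    = (pvCanon ds.length ((pvVal ds + 1) % 10 ^ ds.length),
       (((pvVal ds + 1) / 10 ^ ds.length : Nat) : Int)) := by
  induction ds with
  | nil => simp [pvVal, pvCanon]
  | cons c t ih =>
    simp only [List.all_cons, Bool.and_eq_true] at h
    have hd := pv_digit_bounds h.1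
    have hnt : pvVal t < 10 ^ t.length := pv_val_lt h.2
    rw [List.reverse_cons, List.foldl_append, ih h.2]
    simp only [List.foldl_cons, List.foldl_nil]
    set k := t.length with hk
    set nt := pvVal t with hnt'
    set dc := c.toNat - 48 with hdc
    set ca := (nt + 1) / 10 ^ k with hca
    set s := dc + ca with hs
    have htot : ((c.toNat : Int) - 48) + ((ca : Nat) : Int) = ((s : Nat) : Int) := by
      simp only [hs, hdc]; push_cast; omega
    rw [htot]
    have hmod : PySem.Int.mod ((s : Nat) : Int) 10 = ((s % 10 : Nat) : Int) := by
      exact_mod_cast PySem.Int.mod_natCast s 10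
    have hdiv : PySem.Int.floordiv ((s : Nat) : Int) 10 = ((s / 10 : Nat) : Int) := by
      exact_mod_cast PySem.Int.floordiv_natCast s 10
    rw [hmod, hdiv, Int.toNat_natCast, pv_chr_eq (Nat.mod_lt s (by omega))]
    have harith := pv_arith dc nt k (by omega) hnt
    rw [pv_val_cons]
    simp only [List.length_cons]
    have hcanon : pvCanon (k + 1) ((dc * 10 ^ k + nt + 1) % 10 ^ (k + 1))
        = Nat.digitChar ((dc * 10 ^ k + nt + 1) % 10 ^ (k + 1) / 10 ^ k % 10)
          :: pvCanon k ((dc * 10 ^ k + nt + 1) % 10 ^ (k + 1) % 10 ^ k) := rfl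
    rw [hcanon, harith.1, harith.2.1, harith.2.2]

theorem pv_A_eq (s : String) (hdig : s.toList.all PySem.Chars.isdigit = true) :
    increase_digit_string_py s
      = String.ofList (List.replicate (s.toList.length - (pvCanonPos (pvVal s.toList + 1)).length) '0'
          ++ pvCanonPos (pvVal s.toList + 1)) := by
  simp only [increase_digit_string_py, hdig, Bool.not_true, Bool.false_eq_true, if_false]
  have hs1 : (s.toList.dropWhile (fun c => c == '0')).all PySem.Chars.isdigit = true := by
    rw [List.all_eq_true] at hdig ⊢
    intro c hc
    exact hdig c ((List.dropWhile_sublist _).subset hc)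
  have hv : (if s.toList.dropWhile (fun c => c == '0') = [] then ['0']
        else s.toList.dropWhile (fun c => c == '0')).foldl
        (fun a c => 10 * a + ((c.toNat : Int) - 48)) 0 = ((pvVal s.toList : Nat) : Int) := by
    by_cases h0 : s.toList.dropWhile (fun c => c == '0') = []
    · rw [if_pos h0]
      have : pvVal s.toList = 0 := by
        rw [← pv_val_drop s.toList, h0]; rfl
      rw [this]; rfl
    · rw [if_neg h0]
      have := pv_intfold hs1 0
      simp only [Nat.cast_zero] at this
      rw [this, ← pv_val_drop s.toList]
      rfl
  rw [hv]
  have hcast : ((pvVal s.toList : Nat) : Int) + 1 = ((pvVal s.toList + 1 : Nat) : Int) := by push_cast; ring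
  rw [hcast, PySem.Int.toList_toStr]
  have htc : PySem.Int.toChars ((pvVal s.toList + 1 : Nat) : Int) = Nat.toDigits 10 (pvVal s.toList + 1) := by
    unfold PySem.Int.toChars
    rw [if_neg (by omega), Int.toNat_natCast]
  rw [htc, pv_toDigits]

theorem pv_B_eq (s : String) (hdig : s.toList.all PySem.Chars.isdigit = true) :
    increase_digit_string_py_alt s
      = String.ofList
          (if (((pvVal s.toList + 1) / 10 ^ s.toList.length : Nat) : Int) ≠ 0
           then '1' :: pvCanon s.toList.length ((pvVal s.toList + 1) % 10 ^ s.toList.length)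
           else pvCanon s.toList.length ((pvVal s.toList + 1) % 10 ^ s.toList.length)) := by
  simp only [increase_digit_string_py_alt, hdig, Bool.not_true, Bool.false_eq_true, if_false]
  rw [pv_binv s.toList hdig]

-- ===== VERDICT (by name: the statement is the Claim_ definition above) =====
theorem increase_digit_string_py_spec : Claim_equal_increase_digit_string_py := by
  intro s hDom hPre
  obtain ⟨hdig, -, -⟩ := hPre
  unfold Spec_increase_digit_string_py
  rw [pv_A_eq s hdig, pv_B_eq s hdig]
  set k := s.toList.length with hk
  set m := pvVal s.toList + 1 with hm
  have hmpos : 1 ≤ m := by omega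
  have hmle : m ≤ 10 ^ k := pv_val_lt hdig
  rcases lt_or_eq_of_le hmle with hlt | heq
  · -- no overflow: the carry is 0 and A's padding fills up to the original length
    have hdv : m / 10 ^ k = 0 := Nat.div_eq_of_lt hlt
    have hmd : m % 10 ^ k = m := Nat.mod_eq_of_lt hlt
    rw [hdv, hmd]
    rw [if_neg (by simp)]
    set j := Nat.log 10 m with hj
    have hj1 : 10 ^ j ≤ m := Nat.pow_log_le_self 10 (by omega)
    have hj2 : m < 10 ^ (j + 1) := Nat.lt_pow_succ_log_self (by omega) m
    have hjk : j + 1 ≤ k := by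
      by_contra hcon
      have : 10 ^ k ≤ 10 ^ j := Nat.pow_le_pow_right (by omega) (by omega)
      omega
    rw [pv_canonPos_eq j m hj1 hj2, pv_canon_len]
    congr 1
    have hksplit : k = (j + 1) + (k - (j + 1)) := by omega
    conv_rhs => rw [hksplit]
    rw [pv_canon_pad (k - (j + 1)) (j + 1) m hj2]
  · -- overflow m = 10^k: the carry is 1 and both sides are '1' followed by k zeros
    have hPpos : 0 < 10 ^ k := Nat.pow_pos (by omega)
    have hdv : m / 10 ^ k = 1 := by rw [heq, Nat.div_self hPpos]
    have hmd : m % 10 ^ k = 0 := by rw [heq, Nat.mod_self]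
    rw [hdv, hmd, pv_canon_zero]
    rw [if_pos (by simp)]
    have h2 : m < 10 ^ (k + 1) := by
      rw [heq]
      exact Nat.pow_lt_pow_right (by omega) (Nat.lt_succ_self k)
    rw [pv_canonPos_eq k m (le_of_eq heq.symm) h2, pv_canon_len]
    have hz : k - (k + 1) = 0 := by omega
    rw [hz]
    congr 1
    show pvCanon (k + 1) m = '1' :: List.replicate k '0'
    rw [show pvCanon (k + 1) m = Nat.digitChar (m / 10 ^ k % 10) :: pvCanon k (m % 10 ^ k) from rfl,
      hdv, hmd, pv_canon_zero]
    rfl
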